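-- pv_equiv track=rewrite | github.com/MKovacik/Simulator2 | src/web/app.py | get_last_exchange
-- ===== SOURCE A (Python) =====
-- from typing import Any, List, Optional, Dict, Generator
--
-- def get_last_exchange(history: List[Dict[str, str]]) -> str:
--     """Get the last exchange (last customer message and bot response) from conversation history."""
--     if len(history) < 2:
--         return "No conversation history yet."
--
--     # Find the last customer and bot messages
--     last_customer_msg = next((msg for msg in reversed(history) if msg['role'] == 'customer'), None)
--     last_bot_msg = next((msg for msg in reversed(history) if msg['role'] == 'bot'), None)
--
--     if last_customer_msg and last_bot_msg:
--         return f"Customer: {last_customer_msg['content']}\n\nBot: {last_bot_msg['content']}"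
--     return "Incomplete conversation exchange."
-- ===== SOURCE B (Python) =====
-- def get_last_exchange(history):
--     """Get the last exchange (last customer message and bot response) from conversation history."""
--     if len(history) < 2:
--         return "No conversation history yet."
--     c = b = None
--     # single backward scan with early exit once both roles are found
--     for msg in reversed(history):
--         r = msg['role']
--         if r == 'customer' and c is None:
--             c = msg
--         elif r == 'bot' and b is None:
--             b = msg
--         if c is not None and b is not None:
--             break
--     if c and b:
--         return f"Customer: {c['content']}\n\nBot: {b['content']}"
--     return "Incomplete conversation exchange."
-- ===== Notes on version B (the rewrite author's own statement) =====
-- stated objective: alternative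
-- what changed: Replaces A's two independent reversed next(...) generator scans by one explicit backward loop with two accumulators and an early break once both roles are found.
import Mathlib
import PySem

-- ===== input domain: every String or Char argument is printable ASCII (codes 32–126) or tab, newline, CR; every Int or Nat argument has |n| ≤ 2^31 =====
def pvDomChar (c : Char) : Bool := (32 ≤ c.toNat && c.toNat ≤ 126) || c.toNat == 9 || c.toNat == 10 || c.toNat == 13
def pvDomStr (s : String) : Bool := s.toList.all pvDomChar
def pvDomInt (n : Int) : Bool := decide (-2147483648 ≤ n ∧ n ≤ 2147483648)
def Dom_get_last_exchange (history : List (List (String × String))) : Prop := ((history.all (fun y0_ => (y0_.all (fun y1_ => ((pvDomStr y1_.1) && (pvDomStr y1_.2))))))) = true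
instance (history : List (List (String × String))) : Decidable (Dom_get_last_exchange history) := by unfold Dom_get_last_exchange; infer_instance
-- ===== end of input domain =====

-- B replaces A's two reversed next(...) generator scans by one explicit backward loop with
-- two accumulators and an early break once both roles are found (objective: alternative).

-- ===== PORT A =====
def get_last_exchange (history : List (List (String × String))) : String :=
  if history.length < 2 then "No conversation history yet."
  else
    let last_customer_msg := history.reverse.find? (fun m => (PySem.Dict.mk m).get? "role" == some "customer")
    let last_bot_msg := history.reverse.find? (fun m => (PySem.Dict.mk m).get? "role" == some "bot")
    match last_customer_msg, last_bot_msg with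
    | some c, some b =>
        "Customer: " ++ ((PySem.Dict.mk c).get? "content").getD "" ++ "\n\nBot: " ++ ((PySem.Dict.mk b).get? "content").getD ""
    | _, _ => "Incomplete conversation exchange."

-- ===== PORT B =====
-- the backward loop of Source B: accumulators c b, early break when both are set
def altLoop : List (List (String × String)) → Option (List (String × String)) → Option (List (String × String)) →
    Option (List (String × String)) × Option (List (String × String))
  | [], c, b => (c, b)
  | msg :: rest, c, b =>
    let r := ((PySem.Dict.mk msg).get? "role").getD ""   -- msg['role']; Pre_ excludes the KeyError inputs
    let c' := if r == "customer" && c.isNone then some msg else c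
    let b' := if !(r == "customer" && c.isNone) && (r == "bot" && b.isNone) then some msg else b
    if c'.isSome && b'.isSome then (c', b')              -- break
    else altLoop rest c' b'

def get_last_exchange_alt (history : List (List (String × String))) : String :=
  if history.length < 2 then "No conversation history yet."
  else
    let cb := altLoop history.reverse none none
    if cb.1.isSome && cb.2.isSome then   -- Python: `if c and b:` (a found msg is a non-empty dict)
      "Customer: " ++ ((PySem.Dict.mk (cb.1.getD [])).get? "content").getD "" ++ "\n\nBot: " ++ ((PySem.Dict.mk (cb.2.getD [])).get? "content").getD ""
    else "Incomplete conversation exchange."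

-- ===== PRECONDITION & SPEC =====
-- Pre_ excludes exactly the inputs on which the Python raises KeyError: a message missing
-- 'role' is reached by a scan before both roles are found, or a selected message misses
-- 'content'. (Both A and B raise on exactly these inputs.)
def Pre_get_last_exchange (history : List (List (String × String))) : Prop :=
  history.length < 2 ∨
  ((let t := history.reverse.takeWhile (fun m => ((PySem.Dict.mk m).get? "role").isSome)
    (t.length = history.length ∨
      ((t.any (fun m => (PySem.Dict.mk m).get? "role" == some "customer")) = true ∧
       (t.any (fun m => (PySem.Dict.mk m).get? "role" == some "bot")) = true))) ∧
   ((history.reverse.find? (fun m => (PySem.Dict.mk m).get? "role" == some "customer")).all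
      (fun m => ((PySem.Dict.mk m).get? "content").isSome)) = true ∧
   ((history.reverse.find? (fun m => (PySem.Dict.mk m).get? "role" == some "bot")).all
      (fun m => ((PySem.Dict.mk m).get? "content").isSome)) = true)
instance (history : List (List (String × String))) : Decidable (Pre_get_last_exchange history) := by
  unfold Pre_get_last_exchange; infer_instance

def pvWitness_get_last_exchange : (List (List (String × String))) :=
  [[("role", "customer"), ("content", "hi")], [("role", "bot"), ("content", "ok")]]

def Spec_get_last_exchange (history : List (List (String × String))) (out : String) : Prop := out = get_last_exchange_alt history
instance (history : List (List (String × String))) (out : String) : Decidable (Spec_get_last_exchange history out) := by unfold Spec_get_last_exchange; infer_instance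

-- ===== CLAIM (what is proved, stated in full; the proofs are below) =====
def Claim_equal_get_last_exchange : Prop := ∀ (history : List (List (String × String))), Dom_get_last_exchange history → Pre_get_last_exchange history → Spec_get_last_exchange history (get_last_exchange history)

-- ===== LEMMAS AND PROOFS =====

-- B's early-exit loop computes, componentwise, the accumulator or-ed with A's find? scan.
lemma altLoop_eq_find (l : List (List (String × String)))
    (c b : Option (List (String × String))) :
    altLoop l c b =
      (c.or (l.find? (fun m => ((PySem.Dict.mk m).get? "role").getD "" == "customer")),
       b.or (l.find? (fun m => ((PySem.Dict.mk m).get? "role").getD "" == "bot"))) := by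
  induction l generalizing c b with
  | nil => simp [altLoop]
  | cons msg rest ih =>
    simp only [altLoop]
    set r := ((PySem.Dict.mk msg).get? "role").getD "" with hr
    have hc' : (if r == "customer" && c.isNone then some msg else c)
        = c.or (if r == "customer" then some msg else none) := by
      cases c <;> by_cases h : r = "customer" <;> simp [h]
    have hb' : (if !(r == "customer" && c.isNone) && (r == "bot" && b.isNone) then some msg else b)
        = b.or (if r == "bot" then some msg else none) := by
      cases b <;> cases c <;> by_cases h : r = "bot" <;> simp [h]
    have hf : List.find? (fun m => ((PySem.Dict.mk m).get? "role").getD "" == "customer") (msg :: rest)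
        = (if r == "customer" then some msg else none).or
            (List.find? (fun m => ((PySem.Dict.mk m).get? "role").getD "" == "customer") rest) := by
      simp only [List.find?_cons, ← hr]
      by_cases h : r = "customer"
      · simp [h]
      · simp [beq_eq_false_iff_ne.mpr h]
    have hg : List.find? (fun m => ((PySem.Dict.mk m).get? "role").getD "" == "bot") (msg :: rest)
        = (if r == "bot" then some msg else none).or
            (List.find? (fun m => ((PySem.Dict.mk m).get? "role").getD "" == "bot") rest) := by
      simp only [List.find?_cons, ← hr]
      by_cases h : r = "bot"
      · simp [h]
      · simp [beq_eq_false_iff_ne.mpr h]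
    rw [hc', hb', hf, hg, ← Option.or_assoc, ← Option.or_assoc]
    cases hC : c.or (if r == "customer" then some msg else none) <;>
      cases hB : b.or (if r == "bot" then some msg else none) <;> simp [ih]

-- A's predicate coincides with B's for any non-empty role string
lemma pred_eq (m : List (String × String)) (r : String) (hr : r ≠ "") :
    ((PySem.Dict.mk m).get? "role" == some r) = (((PySem.Dict.mk m).get? "role").getD "" == r) := by
  cases h : (PySem.Dict.mk m).get? "role" with
  | none => simp [Ne.symm hr]
  | some s => simp

-- ===== VERDICT (by name: the statement is the Claim_ definition above) =====
theorem get_last_exchange_spec : Claim_equal_get_last_exchange := by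
  intro history _ _
  unfold Spec_get_last_exchange get_last_exchange get_last_exchange_alt
  by_cases hlen : history.length < 2
  · simp [hlen]
  · simp only [hlen, if_false]
    rw [altLoop_eq_find]
    have hc : (fun m => (PySem.Dict.mk m).get? "role" == some "customer")
        = (fun m => ((PySem.Dict.mk m).get? "role").getD "" == "customer") := by
      funext m; exact pred_eq m "customer" (by decide)
    have hb : (fun m => (PySem.Dict.mk m).get? "role" == some "bot")
        = (fun m => ((PySem.Dict.mk m).get? "role").getD "" == "bot") := by
      funext m; exact pred_eq m "bot" (by decide)
    rw [hc, hb]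
    cases history.reverse.find? (fun m => ((PySem.Dict.mk m).get? "role").getD "" == "customer") <;>
      cases history.reverse.find? (fun m => ((PySem.Dict.mk m).get? "role").getD "" == "bot") <;> rfl
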